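-- pv_equiv track=rewrite | github.com/howard0829/gen_comment | parsers/c_parser.py | _skip_trailing_return_type
-- ===== SOURCE A (Python) =====
-- def _skip_trailing_return_type(clean: str, i: int) -> int:
--     """후행 반환타입 `-> Type` 을 역추적하여 건너뛴다.
--
--     예: `auto foo(int x) -> int {` 에서 i가 `int`의 `t`를 가리킬 때,
--     `->` 를 찾아 그 앞의 `)` 위치를 반환한다.
--     """
--     # { 이전 같은 줄/근처에서 -> 패턴을 역방향 검색
--     # i 부터 뒤로 최대 200자까지 -> 를 찾음
--     search_start = max(0, i - 200)
--     segment = clean[search_start:i + 1]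
--
--     # 가장 마지막 -> 를 찾음
--     arrow_pos = segment.rfind("->")
--     if arrow_pos == -1:
--         return i
--
--     abs_arrow = search_start + arrow_pos
--
--     # -> 와 i 사이에 ; { } 가 없어야 함 (같은 문맥인지 확인)
--     between = clean[abs_arrow + 2:i + 1]
--     if any(ch in between for ch in ";{}"):
--         return i
--
--     # -> 앞으로 이동
--     j = abs_arrow - 1
--     while j >= 0 and clean[j] in " \t\n\r":
--         j -= 1
--
--     return j
-- ===== SOURCE B (Python) =====
-- def _skip_trailing_return_type(clean: str, i: int) -> int:
--     """Walk backward from i toward the window floor; a ';', '{' or '}' met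
--     first means a different context, while the first '->' met is the
--     rightmost one, so skip whitespace before it and return."""
--     lo = max(0, i - 200)
--     j = min(i, len(clean) - 1)
--     while j > lo:
--         ch = clean[j]
--         if ch in ";{}":
--             return i
--         if ch == '>' and clean[j - 1] == '-':
--             k = j - 2
--             while k >= 0 and clean[k] in " \t\n\r":
--                 k -= 1
--             return k
--         j -= 1
--     return i
-- ===== Notes on version B (the rewrite author's own statement) =====
-- stated objective: alternative
-- what changed: Replaces the slice + rfind + between-slice + any(ch in between) pipeline (three passes over the window plus two temporary strings) with one backward index scan that finds the rightmost '->' and enforces the no-';{}' rule by early termination; Pre_ restricts to the natural domain i >= 0, since for negative i A's slice end clean[search_start:i+1] wraps around to the string's tail, an accidental window, while B simply returns i there.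
-- outside the precondition, e.g. on _skip_trailing_return_type('->x', -2): A returns -1, B returns -2
import Mathlib
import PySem

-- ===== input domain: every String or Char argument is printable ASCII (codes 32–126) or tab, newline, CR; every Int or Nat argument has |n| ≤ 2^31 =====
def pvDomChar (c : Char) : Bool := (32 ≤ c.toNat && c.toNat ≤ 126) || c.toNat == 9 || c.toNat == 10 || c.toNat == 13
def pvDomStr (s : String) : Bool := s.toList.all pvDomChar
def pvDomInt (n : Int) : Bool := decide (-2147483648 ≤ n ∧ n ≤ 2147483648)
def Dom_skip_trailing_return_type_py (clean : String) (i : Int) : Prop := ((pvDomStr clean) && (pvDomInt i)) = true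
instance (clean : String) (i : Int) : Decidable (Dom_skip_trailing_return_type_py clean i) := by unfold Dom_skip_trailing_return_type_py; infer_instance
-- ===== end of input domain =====

-- B replaces A's slice + rfind + between-slice + any pipeline by one backward scan; same return value on i ≥ 0, no speed claim.

-- ===== PORT A =====
-- A's trailing while loop `while j >= 0 and clean[j] in " \t\n\r": j -= 1; return j`.
-- (clean[j] is always in range when A reaches this loop, so the pyGetD default is never the decider.)
def pvWsAGo : Nat → List Char → Int → Int
  | 0, _, j => j
  | fu + 1, cs, j =>
    if 0 ≤ j then
      if PySem.List.pyGetD cs j 'x' ∈ ([' ', '\t', '\n', '\r'] : List Char) then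
        pvWsAGo fu cs (j - 1)
      else j
    else j

def pvWsA (cs : List Char) (j : Int) : Int := pvWsAGo (j + 1).toNat cs j

def skip_trailing_return_type_py (clean : String) (i : Int) : Int :=
  let cs := clean.toList
  let search_start : Int := max 0 (i - 200)
  let segment := PySem.List.slice cs (some search_start) (some (i + 1))
  let arrow_pos := PySem.Chars.rfind segment ['-', '>']
  if arrow_pos = -1 then i
  else
    let abs_arrow := search_start + arrow_pos
    let between := PySem.List.slice cs (some (abs_arrow + 2)) (some (i + 1))
    if ([';', '{', '}'] : List Char).any (fun ch => PySem.Chars.isIn [ch] between) then i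
    else pvWsA cs (abs_arrow - 1)

-- ===== PORT B =====
-- B's inner while loop `while k >= 0 and clean[k] in " \t\n\r": k -= 1; return k`.
def pvWsBGo : Nat → List Char → Int → Int
  | 0, _, k => k
  | fu + 1, cs, k =>
    if 0 ≤ k then
      if PySem.List.pyGetD cs k 'x' ∈ ([' ', '\t', '\n', '\r'] : List Char) then
        pvWsBGo fu cs (k - 1)
      else k
    else k

def pvWsB (cs : List Char) (k : Int) : Int := pvWsBGo (k + 1).toNat cs k

-- B's main backward loop `while j > lo: ...` (all accesses are in range in Source B).
def pvScanBGo : Nat → List Char → Int → Int → Int → Int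
  | 0, _, i, _, _ => i
  | fu + 1, cs, i, lo, j =>
    if lo + 1 ≤ j then
      if PySem.List.pyGetD cs j 'x' ∈ ([';', '{', '}'] : List Char) then i
      else if PySem.List.pyGetD cs j 'x' = '>' ∧ PySem.List.pyGetD cs (j - 1) 'x' = '-' then
        pvWsB cs (j - 2)
      else pvScanBGo fu cs i lo (j - 1)
    else i

def pvScanB (cs : List Char) (i lo j : Int) : Int := pvScanBGo (j - lo).toNat cs i lo j

def skip_trailing_return_type_py_alt (clean : String) (i : Int) : Int :=
  let cs := clean.toList
  let lo := max 0 (i - 200)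
  let j := min i ((cs.length : Int) - 1)
  pvScanB cs i lo j

-- ===== PRECONDITION & SPEC =====
-- Pre_ restricts to the natural domain i ≥ 0 (i is an index into clean): for negative i,
-- A's slice end clean[search_start:i+1] wraps around to the string's tail, an accidental
-- window no caller relies on; B scans the natural window and just returns i there.
def Pre_skip_trailing_return_type_py (clean : String) (i : Int) : Prop := 0 ≤ i
instance (clean : String) (i : Int) : Decidable (Pre_skip_trailing_return_type_py clean i) := by unfold Pre_skip_trailing_return_type_py; infer_instance

def pvWitness_skip_trailing_return_type_py : String × Int := ("auto f() -> int {", 14)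

def Spec_skip_trailing_return_type_py (clean : String) (i : Int) (out : Int) : Prop := out = skip_trailing_return_type_py_alt clean i
instance (clean : String) (i : Int) (out : Int) : Decidable (Spec_skip_trailing_return_type_py clean i out) := by unfold Spec_skip_trailing_return_type_py; infer_instance

-- ===== CLAIM (what is proved, stated in full; the proofs are below) =====
def Claim_equal_skip_trailing_return_type_py : Prop := ∀ (clean : String) (i : Int), Dom_skip_trailing_return_type_py clean i → Pre_skip_trailing_return_type_py clean i → Spec_skip_trailing_return_type_py clean i (skip_trailing_return_type_py clean i)

-- ===== LEMMAS AND PROOFS =====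

-- An "event" at position t: a context breaker ';' '{' '}' or the '>' that ends an arrow '->'.
def pvEv (cs : List Char) (t : Nat) : Prop :=
  (cs[t]? = some ';' ∨ cs[t]? = some '{' ∨ cs[t]? = some '}') ∨
  (cs[t]? = some '>' ∧ cs[t - 1]? = some '-')

theorem pv_wsgo_eq (fu : Nat) (cs : List Char) (j : Int) : pvWsAGo fu cs j = pvWsBGo fu cs j := by
  induction fu generalizing j with
  | zero => rfl
  | succ fu ih =>
    simp only [pvWsAGo, pvWsBGo]
    split_ifs
    · exact ih _
    · rfl
    · rfl

theorem pv_ws_eq (cs : List Char) (j : Int) : pvWsA cs j = pvWsB cs j := pv_wsgo_eq _ cs j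

theorem pv_singleton_infix (a : Char) (l : List Char) : [a] <:+: l ↔ a ∈ l := by
  constructor
  · intro h; exact h.subset (by simp)
  · intro h
    obtain ⟨s, t, rfl⟩ := List.append_of_mem h
    exact ⟨s, t, by simp⟩

theorem pv_any_bad (l : List Char) :
    ((([';', '{', '}'] : List Char).any fun ch => PySem.Chars.isIn [ch] l) = true) ↔
      (';' ∈ l ∨ '{' ∈ l ∨ '}' ∈ l) := by
  simp [PySem.Chars.isIn_iff_infix, pv_singleton_infix]

theorem pv_prefixAB (l : List Char) :
    ((['-', '>'] : List Char).isPrefixOf l = true) ↔ (l[0]? = some '-' ∧ l[1]? = some '>') := by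
  match l with
  | [] => simp [List.isPrefixOf]
  | [x] => simp [List.isPrefixOf]
  | x :: y :: t =>
    simp only [List.isPrefixOf, List.getElem?_cons_zero, List.getElem?_cons_succ,
      Bool.and_eq_true, beq_iff_eq, Option.some.injEq]
    constructor
    · rintro ⟨h1, h2, -⟩; exact ⟨h1.symm, h2.symm⟩
    · rintro ⟨rfl, rfl⟩; exact ⟨rfl, rfl, by simp⟩

theorem pv_window_arrow (cs : List Char) (m r : Nat) :
    ((['-', '>'] : List Char).isPrefixOf ((cs.drop m).take r) = true) ↔
      (2 ≤ r ∧ cs[m]? = some '-' ∧ cs[m + 1]? = some '>') := by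
  rw [pv_prefixAB]
  simp only [List.getElem?_take, List.getElem?_drop]
  constructor
  · rintro ⟨h0, h1⟩
    split_ifs at h0 h1 <;> simp_all <;> omega
  · rintro ⟨hr, h0, h1⟩
    constructor
    · rw [if_pos (by omega)]; simpa using h0
    · rw [if_pos (by omega)]; simpa using h1

theorem pv_mem_window (cs : List Char) (D E : Nat) (c : Char) :
    (c ∈ (cs.drop D).take (E - D)) ↔ ∃ t : Nat, D ≤ t ∧ t < E ∧ cs[t]? = some c := by
  rw [List.mem_iff_getElem?]
  constructor
  · rintro ⟨k, hk⟩
    simp only [List.getElem?_take, List.getElem?_drop] at hk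
    by_cases h : k < E - D
    · rw [if_pos h] at hk
      exact ⟨D + k, by omega, by omega, hk⟩
    · rw [if_neg h] at hk
      exact absurd hk (by simp)
  · rintro ⟨t, h1, h2, h3⟩
    refine ⟨t - D, ?_⟩
    simp only [List.getElem?_take, List.getElem?_drop]
    rw [if_pos (by omega)]
    have ht : D + (t - D) = t := by omega
    rw [ht]; exact h3

theorem pv_go_zero (s sub : List Char) :
    PySem.Chars.rfind.go s sub 0 = if sub.isPrefixOf s then 0 else -1 := by
  rw [PySem.Chars.rfind.go]

theorem pv_go_succ (s sub : List Char) (k : Nat) :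
    PySem.Chars.rfind.go s sub (k + 1) =
      if sub.isPrefixOf (s.drop (k + 1)) then ((k + 1 : Nat) : Int) else PySem.Chars.rfind.go s sub k := by
  rw [PySem.Chars.rfind.go]

theorem pv_go_neg (s sub : List Char) (k : Nat)
    (h : ∀ p : Nat, p ≤ k → sub.isPrefixOf (s.drop p) = false) :
    PySem.Chars.rfind.go s sub k = -1 := by
  induction k with
  | zero =>
    rw [pv_go_zero]
    have := h 0 (le_refl _)
    simp at this
    simp [this]
  | succ k ih =>
    rw [pv_go_succ, h (k + 1) le_rfl]
    simp
    exact ih (fun p hp => h p (by omega))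

theorem pv_go_max (s sub : List Char) (k p : Nat) (hpk : p ≤ k)
    (hp : sub.isPrefixOf (s.drop p) = true)
    (hmax : ∀ q, p < q → q ≤ k → sub.isPrefixOf (s.drop q) = false) :
    PySem.Chars.rfind.go s sub k = (p : Int) := by
  induction k with
  | zero =>
    have hp0 : p = 0 := by omega
    subst hp0
    simp at hp
    rw [pv_go_zero]
    simp [hp]
  | succ k ih =>
    by_cases hpe : p = k + 1
    · subst hpe
      rw [pv_go_succ, hp]
      simp
    · rw [pv_go_succ, hmax (k + 1) (by omega) le_rfl]
      simp
      exact ih (by omega) (fun q h1 h2 => hmax q h1 (by omega))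

theorem pv_go_mem (s sub : List Char) (k : Nat)
    (h : PySem.Chars.rfind.go s sub k ≠ -1) :
    ∃ p : Nat, PySem.Chars.rfind.go s sub k = (p : Int) ∧ p ≤ k ∧ sub.isPrefixOf (s.drop p) = true := by
  induction k with
  | zero =>
    rw [pv_go_zero] at h ⊢
    by_cases hpre : sub.isPrefixOf s = true
    · exact ⟨0, by simp [hpre], le_refl _, by simpa using hpre⟩
    · simp [hpre] at h
  | succ k ih =>
    rw [pv_go_succ] at h ⊢
    by_cases hpre : sub.isPrefixOf (s.drop (k + 1)) = true
    · exact ⟨k + 1, by simp [hpre], le_refl _, hpre⟩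
    · simp only [hpre] at h ⊢
      obtain ⟨p, h1, h2, h3⟩ := ih h
      exact ⟨p, h1, by omega, h3⟩

theorem pv_clamp_nonneg (n : Nat) (a : Int) (ha : 0 ≤ a) :
    PySem.List.clampIdx n a = min a.toNat n := by
  unfold PySem.List.clampIdx
  rw [if_neg (by omega)]

theorem pv_clamp_e (n : Nat) (i : Int) :
    ((PySem.List.clampIdx n (i + 1) : Nat) : Int) =
      max 0 (min (if i + 1 < 0 then i + 1 + (n : Int) else i + 1) (n : Int)) := by
  unfold PySem.List.clampIdx
  split_ifs <;> omega

theorem pv_slice_eq (cs : List Char) (a b : Int) :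
    PySem.List.slice cs (some a) (some b) =
      (cs.drop (PySem.List.clampIdx cs.length a)).take
        (PySem.List.clampIdx cs.length b - PySem.List.clampIdx cs.length a) := rfl

theorem pv_scan_eq_A (clean : String) (i lo e : Int)
    (hlo : lo = max 0 (i - 200))
    (he : e = max 0 (min (if i + 1 < 0 then i + 1 + (clean.toList.length : Int) else i + 1)
          (clean.toList.length : Int)))
    (d : Nat) (hje : lo + (d : Int) ≤ e - 1)
    (hinv : ∀ t : Nat, lo + (d : Int) < (t : Int) → (t : Int) ≤ e - 1 → ¬ pvEv clean.toList t) :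
    pvScanBGo d clean.toList i lo (lo + (d : Int)) = skip_trailing_return_type_py clean i := by
  set cs := clean.toList with hcs
  have hlo0 : 0 ≤ lo := by rw [hlo]; exact le_max_left 0 _
  have he0 : 0 ≤ e := by rw [he]; exact le_max_left 0 _
  have hen : e ≤ (cs.length : Int) := by
    rw [he]; exact max_le (Int.natCast_nonneg _) (min_le_right _ _)
  set LO := lo.toNat with hLOdef
  set E := e.toNat with hEdef
  have hLO : (LO : Int) = lo := Int.toNat_of_nonneg hlo0
  have hE : (E : Int) = e := Int.toNat_of_nonneg he0
  have hEn : E ≤ cs.length := by omega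
  have hclampB : PySem.List.clampIdx cs.length (i + 1) = E := by
    have h1 := pv_clamp_e cs.length i
    rw [← he] at h1
    omega
  have hseg : PySem.List.slice cs (some lo) (some (i + 1)) = (cs.drop LO).take (E - LO) := by
    rw [pv_slice_eq, pv_clamp_nonneg _ _ hlo0, hclampB, ← hLOdef]
    have hm : min LO cs.length = LO := by omega
    rw [hm]
  have hseglen : ((cs.drop LO).take (E - LO)).length = E - LO := by
    simp [List.length_take, List.length_drop]
    omega
  have hrfind : PySem.Chars.rfind ((cs.drop LO).take (E - LO)) ['-', '>'] =
      PySem.Chars.rfind.go ((cs.drop LO).take (E - LO)) ['-', '>'] (E - LO) := by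
    unfold PySem.Chars.rfind
    rw [hseglen]
  have harrow : ∀ p : Nat,
      ((['-', '>'] : List Char).isPrefixOf (((cs.drop LO).take (E - LO)).drop p) = true) ↔
        (LO + p + 2 ≤ E ∧ cs[LO + p]? = some '-' ∧ cs[LO + p + 1]? = some '>') := by
    intro p
    have h1 : ((cs.drop LO).take (E - LO)).drop p = (cs.drop (LO + p)).take (E - LO - p) := by
      rw [List.drop_take, List.drop_drop]
    rw [h1, pv_window_arrow]
    constructor
    · rintro ⟨h2, h3, h4⟩; exact ⟨by omega, h3, h4⟩
    · rintro ⟨h2, h3, h4⟩; exact ⟨by omega, h3, h4⟩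
  have evOf : ∀ p : Nat, LO + p + 2 ≤ E → cs[LO + p]? = some '-' → cs[LO + p + 1]? = some '>' →
      pvEv cs (LO + p + 1) := by
    intro p h1 h2 h3
    right
    exact ⟨h3, by simpa using h2⟩
  revert hje hinv
  induction d with
  | zero =>
    intro hje hinv
    simp only [pvScanBGo]
    have hall : ∀ p : Nat, p ≤ E - LO →
        (['-', '>'] : List Char).isPrefixOf (((cs.drop LO).take (E - LO)).drop p) = false := by
      intro p hp
      by_contra hb
      rw [Bool.not_eq_false, harrow p] at hb
      obtain ⟨h1, h2, h3⟩ := hb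
      exact hinv (LO + p + 1) (by push_cast; omega) (by push_cast; omega) (evOf p h1 h2 h3)
    have hA : skip_trailing_return_type_py clean i = i := by
      simp only [skip_trailing_return_type_py, ← hcs, ← hlo, hseg, hrfind]
      rw [pv_go_neg _ _ _ hall]
      simp
    rw [hA]
  | succ d ih =>
    intro hje hinv
    simp only [pvScanBGo]
    rw [if_pos (by push_cast; omega : lo + 1 ≤ lo + ((d + 1 : Nat) : Int))]
    have hidx1 : lo + ((d + 1 : Nat) : Int) = ((LO + d + 1 : Nat) : Int) := by push_cast; omega
    have hidx2 : ((LO + d + 1 : Nat) : Int) - 1 = ((LO + d : Nat) : Int) := by push_cast; omega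
    simp only [hidx1, hidx2, PySem.List.pyGetD_natCast]
    have hlt1 : LO + d + 1 < cs.length := by omega
    have hlt0 : LO + d < cs.length := by omega
    have hc : cs[LO + d + 1]? = some (cs.getD (LO + d + 1) 'x') := by
      rw [List.getD_eq_getElem?_getD, List.getElem?_eq_getElem hlt1]
      rfl
    have hc' : cs[LO + d]? = some (cs.getD (LO + d) 'x') := by
      rw [List.getD_eq_getElem?_getD, List.getElem?_eq_getElem hlt0]
      rfl
    set c := cs.getD (LO + d + 1) 'x' with hcdef
    set c' := cs.getD (LO + d) 'x' with hc'def
    by_cases hbad : c ∈ ([';', '{', '}'] : List Char)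
    · rw [if_pos hbad]
      have hbad' := hbad
      simp only [List.mem_cons, List.not_mem_nil, or_false] at hbad'
      have hcne : c ≠ '>' := by rcases hbad' with h | h | h <;> simp [h]
      symm
      simp only [skip_trailing_return_type_py, ← hcs, ← hlo, hseg, hrfind]
      by_cases hap : PySem.Chars.rfind.go ((cs.drop LO).take (E - LO)) ['-', '>'] (E - LO) = -1
      · rw [hap]; simp
      · obtain ⟨p, hgo, hpk, hpre⟩ := pv_go_mem _ _ _ hap
        rw [harrow p] at hpre
        obtain ⟨h1, h2, h3⟩ := hpre
        have ht0 : LO + p + 1 ≤ LO + d + 1 := by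
          by_contra hgt
          exact hinv (LO + p + 1) (by push_cast; omega) (by push_cast; omega) (evOf p h1 h2 h3)
        have hne : LO + p + 1 ≠ LO + d + 1 := by
          intro heq
          rw [heq] at h3
          exact hcne (Option.some.inj (hc.symm.trans h3))
        have hbet : PySem.List.slice cs (some (lo + (p : Int) + 2)) (some (i + 1)) =
            (cs.drop (LO + p + 2)).take (E - (LO + p + 2)) := by
          rw [pv_slice_eq, hclampB, pv_clamp_nonneg _ _ (by omega : (0 : Int) ≤ lo + (p : Int) + 2)]
          have ht : (lo + (p : Int) + 2).toNat = LO + p + 2 := by omega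
          rw [ht]
          have hm : min (LO + p + 2) cs.length = LO + p + 2 := by omega
          rw [hm]
        have hany : (([';', '{', '}'] : List Char).any fun ch =>
            PySem.Chars.isIn [ch] ((cs.drop (LO + p + 2)).take (E - (LO + p + 2)))) = true := by
          rw [pv_any_bad]
          have hmem : c ∈ (cs.drop (LO + p + 2)).take (E - (LO + p + 2)) :=
            (pv_mem_window cs (LO + p + 2) E c).mpr ⟨LO + d + 1, by omega, by omega, hc⟩
          rcases hbad' with h | h | h
          · exact Or.inl (h ▸ hmem)
          · exact Or.inr (Or.inl (h ▸ hmem))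
          · exact Or.inr (Or.inr (h ▸ hmem))
        simp only [hgo, hbet]
        rw [if_neg (by omega : ¬((p : Int) = -1)), if_pos hany]
    · rw [if_neg hbad]
      by_cases harr : c = '>' ∧ c' = '-'
      · rw [if_pos harr]
        have hpre : (['-', '>'] : List Char).isPrefixOf
            (((cs.drop LO).take (E - LO)).drop d) = true := by
          rw [harrow d]
          refine ⟨by omega, ?_, ?_⟩
          · rw [hc', harr.2]
          · rw [hc, harr.1]
        have hmax : ∀ q, d < q → q ≤ E - LO →
            (['-', '>'] : List Char).isPrefixOf (((cs.drop LO).take (E - LO)).drop q) = false := by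
          intro q hq1 hq2
          by_contra hb
          rw [Bool.not_eq_false, harrow q] at hb
          obtain ⟨h1, h2, h3⟩ := hb
          exact hinv (LO + q + 1) (by push_cast; omega) (by push_cast; omega) (evOf q h1 h2 h3)
        have hbet : PySem.List.slice cs (some (lo + (d : Int) + 2)) (some (i + 1)) =
            (cs.drop (LO + d + 2)).take (E - (LO + d + 2)) := by
          rw [pv_slice_eq, hclampB, pv_clamp_nonneg _ _ (by omega : (0 : Int) ≤ lo + (d : Int) + 2)]
          have ht : (lo + (d : Int) + 2).toNat = LO + d + 2 := by omega
          rw [ht]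
          have hm : min (LO + d + 2) cs.length = LO + d + 2 := by omega
          rw [hm]
        have hno : (([';', '{', '}'] : List Char).any fun ch =>
            PySem.Chars.isIn [ch] ((cs.drop (LO + d + 2)).take (E - (LO + d + 2)))) = false := by
          by_contra hb
          rw [Bool.not_eq_false, pv_any_bad] at hb
          have hstep : ∀ ch : Char, ch ∈ (cs.drop (LO + d + 2)).take (E - (LO + d + 2)) →
              (ch = ';' ∨ ch = '{' ∨ ch = '}') → False := by
            intro ch hmem hch
            obtain ⟨t, ht1, ht2, ht3⟩ := (pv_mem_window cs (LO + d + 2) E ch).mp hmem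
            refine hinv t (by push_cast; omega) (by push_cast; omega) ?_
            left
            rcases hch with rfl | rfl | rfl
            · exact Or.inl ht3
            · exact Or.inr (Or.inl ht3)
            · exact Or.inr (Or.inr ht3)
          rcases hb with h | h | h
          · exact hstep _ h (Or.inl rfl)
          · exact hstep _ h (Or.inr (Or.inl rfl))
          · exact hstep _ h (Or.inr (Or.inr rfl))
        symm
        simp only [skip_trailing_return_type_py, ← hcs, ← hlo, hseg, hrfind]
        simp only [pv_go_max ((cs.drop LO).take (E - LO)) ['-', '>'] (E - LO) d (by omega) hpre hmax]
        simp only [hbet]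
        rw [if_neg (by omega : ¬((d : Int) = -1)), if_neg (by simp [hno])]
        rw [pv_ws_eq]
        congr 1
        omega
      · rw [if_neg harr]
        rw [(show ((LO + d : Nat) : Int) = lo + ((d : Nat) : Int) by omega)]
        refine ih (by omega) ?_
        intro t h1 h2
        by_cases hte : t = LO + d + 1
        · subst hte
          intro hev
          rcases hev with hb | ⟨h3, h4⟩
          · apply hbad
            rcases hb with h | h | h
            · have : c = ';' := Option.some.inj (hc.symm.trans h)
              simp [this]
            · have : c = '{' := Option.some.inj (hc.symm.trans h)
              simp [this]
            · have : c = '}' := Option.some.inj (hc.symm.trans h)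
              simp [this]
          · apply harr
            have hidx : (LO + d + 1) - 1 = LO + d := by omega
            rw [hidx] at h4
            exact ⟨Option.some.inj (hc.symm.trans h3), Option.some.inj (hc'.symm.trans h4)⟩
        · exact hinv t (by push_cast; omega) h2

-- ===== VERDICT (by name: the statement is the Claim_ definition above) =====
theorem skip_trailing_return_type_py_spec : Claim_equal_skip_trailing_return_type_py := by
  intro clean i _ hpre
  unfold Pre_skip_trailing_return_type_py at hpre
  unfold Spec_skip_trailing_return_type_py
  simp only [skip_trailing_return_type_py_alt]
  set lo := max 0 (i - 200) with hlo
  set e := max 0 (min (if i + 1 < 0 then i + 1 + (clean.toList.length : Int) else i + 1)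
      (clean.toList.length : Int)) with he
  have hif : (if i + 1 < 0 then i + 1 + (clean.toList.length : Int) else i + 1) = i + 1 :=
    if_neg (by omega)
  have hej : min i ((clean.toList.length : Int) - 1) = e - 1 := by
    rw [he, hif]; omega
  rw [hej]
  by_cases hcase : lo ≤ e - 1
  · have hlo0 : 0 ≤ lo := le_max_left 0 _
    have h := pv_scan_eq_A clean i lo e hlo he (e - 1 - lo).toNat (by omega)
        (by intro t h1 h2 hev; omega)
    rw [(show lo + (((e - 1 - lo).toNat : Nat) : Int) = e - 1 by omega)] at h
    simp only [pvScanB]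
    exact h.symm
  · have hlo0 : 0 ≤ lo := le_max_left 0 _
    have he0 : 0 ≤ e := le_max_left 0 _
    have hen : e ≤ (clean.toList.length : Int) :=
      max_le (Int.natCast_nonneg _) (min_le_right _ _)
    have hseg : PySem.List.slice clean.toList (some lo) (some (i + 1)) = [] := by
      rw [pv_slice_eq, pv_clamp_nonneg _ _ hlo0]
      have h1 := pv_clamp_e clean.toList.length i
      rw [← he] at h1
      have h0 : PySem.List.clampIdx clean.toList.length (i + 1) -
          min lo.toNat clean.toList.length = 0 := by omega
      rw [h0, List.take_zero]
    have hrfnil : PySem.Chars.rfind ([] : List Char) ['-', '>'] = -1 := by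
      unfold PySem.Chars.rfind
      simp only [List.length_nil]
      rw [pv_go_zero]
      simp [List.isPrefixOf]
    have hA : skip_trailing_return_type_py clean i = i := by
      simp only [skip_trailing_return_type_py, ← hlo, hseg, hrfnil]
      simp
    simp only [pvScanB]
    rw [hA, (show (e - 1 - lo).toNat = 0 by omega)]
    rfl
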